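-- pv_equiv track=rewrite | github.com/karlaHH/DeteccionDePlagios | OCRs/sinComentarios/ocr12.py | caracteristica11
-- ===== SOURCE A (Python) =====
-- def caracteristica11(img, tamImg):
--
--     alto=len(img)
--
--     ancho=int(tamImg/alto)
--
--     dista=int((int(ancho/4))*3)
--
--     numuns=0
--
--     val=0
--
--     for al in range(alto):
--
--         compara=(int(img[al][dista]))
--
--         if compara!=val:
--
--             numuns=numuns+1
--
--             val=(int(img[al][dista]))
--
--     return numuns
-- ===== SOURCE B (Python) =====
-- def _runs(xs):
--     # number of maximal runs of equal adjacent values in xs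
--     if not xs:
--         return 0
--     head = xs[0]
--     i = 1
--     while i < len(xs) and xs[i] == head:
--         i += 1
--     return 1 + _runs(xs[i:])
--
-- def caracteristica11(img, tamImg):
--     alto = len(img)
--     ancho = int(tamImg / alto)
--     dista = int(int(ancho / 4) * 3)
--     col = [int(fila[dista]) for fila in img]
--     # transitions = number of runs of the 0-seeded column, minus the seed's own run
--     return _runs([0] + col) - 1
-- ===== Notes on version B (the rewrite author's own statement) =====
-- stated objective: alternative
-- what changed: Replaces A's per-row accumulator scan by run-length reasoning: extract the column, then recursively count the maximal runs of equal values in the 0-seeded column (skipping each run wholesale) and return runs minus one.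
import Mathlib
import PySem

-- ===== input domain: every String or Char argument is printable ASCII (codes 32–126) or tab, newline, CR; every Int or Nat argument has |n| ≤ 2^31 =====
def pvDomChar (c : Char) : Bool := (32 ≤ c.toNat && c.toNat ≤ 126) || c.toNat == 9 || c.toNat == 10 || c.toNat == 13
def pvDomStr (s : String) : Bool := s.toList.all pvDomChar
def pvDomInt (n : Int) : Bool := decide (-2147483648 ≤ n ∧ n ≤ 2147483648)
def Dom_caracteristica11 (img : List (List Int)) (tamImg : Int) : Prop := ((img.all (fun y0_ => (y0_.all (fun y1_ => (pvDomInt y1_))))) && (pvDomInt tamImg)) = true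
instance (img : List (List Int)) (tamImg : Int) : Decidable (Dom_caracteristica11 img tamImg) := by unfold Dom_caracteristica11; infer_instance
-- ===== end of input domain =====

-- B counts maximal runs of equal values in the 0-seeded column by a recursion that skips
-- each run wholesale, returning runs - 1, instead of A's per-row accumulator scan.
-- Pre_ excludes the inputs where A raises (empty img: ZeroDivisionError; column index
-- out of range: IndexError).

-- ===== PORT A =====
-- transliteration of A: int(x/y) on ints = PySem.Int.truncdiv (exact, |args| ≤ 2^31 by Dom)
def caracteristica11 (img : List (List Int)) (tamImg : Int) : Int :=
  let alto : Int := (img.length : Int)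
  let ancho : Int := PySem.Int.truncdiv tamImg alto
  let dista : Int := (PySem.Int.truncdiv ancho 4) * 3
  let st := (PySem.List.pyRange 0 alto 1).foldl
    (fun (st : Int × Int) al =>
      let compara := PySem.List.pyGetD (PySem.List.pyGetD img al []) dista 0
      if compara ≠ st.2 then
        (st.1 + 1, PySem.List.pyGetD (PySem.List.pyGetD img al []) dista 0)
      else st) (0, 0)
  st.1

-- ===== PORT B =====
-- _runs: the while loop advancing i past the head's run then recursing on xs[i:] is
-- ported as dropWhile (== head) on the tail (exactly the elements the while skips).
def pvRuns : List Int → Int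
  | [] => 0
  | h :: t => 1 + pvRuns (t.dropWhile (fun x => x == h))
termination_by xs => xs.length
decreasing_by
  exact Nat.lt_succ_of_le (List.length_dropWhile_le _ _)

def caracteristica11_alt (img : List (List Int)) (tamImg : Int) : Int :=
  let alto : Int := (img.length : Int)
  let ancho : Int := PySem.Int.truncdiv tamImg alto
  let dista : Int := (PySem.Int.truncdiv ancho 4) * 3
  let col : List Int := img.map (fun fila => PySem.List.pyGetD fila dista 0)
  pvRuns ((0 : Int) :: col) - 1

-- ===== PRECONDITION & SPEC =====
-- Pre_: exactly where A returns — img nonempty (else ZeroDivisionError) and the computed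
-- column index in Python range for every row (else IndexError).
def Pre_caracteristica11 (img : List (List Int)) (tamImg : Int) : Prop :=
  img ≠ [] ∧
  ∀ fila ∈ img, PySem.Raise.InRange fila.length
    ((PySem.Int.truncdiv (PySem.Int.truncdiv tamImg (img.length : Int)) 4) * 3)
instance (img : List (List Int)) (tamImg : Int) : Decidable (Pre_caracteristica11 img tamImg) := by unfold Pre_caracteristica11; infer_instance

def pvWitness_caracteristica11 : List (List Int) × Int := ([[0, 5, 5, 7], [0, 2, 2, 2]], 8)

def Spec_caracteristica11 (img : List (List Int)) (tamImg : Int) (out : Int) : Prop := out = caracteristica11_alt img tamImg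
instance (img : List (List Int)) (tamImg : Int) (out : Int) : Decidable (Spec_caracteristica11 img tamImg out) := by unfold Spec_caracteristica11; infer_instance

-- ===== CLAIM =====
def Claim_equal_caracteristica11 : Prop := ∀ (img : List (List Int)) (tamImg : Int), Dom_caracteristica11 img tamImg → Pre_caracteristica11 img tamImg → Spec_caracteristica11 img tamImg (caracteristica11 img tamImg)

-- ===== LEMMAS AND PROOFS =====

-- transition count of a v-seeded sequence, the common characterisation of both programs
def pvCt : Int → List Int → Int
  | _, [] => 0
  | v, x :: xs => (if x ≠ v then 1 else 0) + pvCt x xs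

-- A's accumulator loop computes the transition count
theorem pv_foldl_ct {A : Type} (g : A → Int) (rows : List A) (n v : Int) :
    (rows.foldl (fun (st : Int × Int) r => if g r ≠ st.2 then (st.1 + 1, g r) else st) (n, v)).1
    = n + pvCt v (rows.map g) := by
  induction rows generalizing n v with
  | nil => simp [pvCt]
  | cons r rest ih =>
    simp only [List.foldl_cons, List.map_cons, pvCt]
    by_cases h : g r = v
    · rw [if_neg (by simp [h]), ih]; simp [h]
    · rw [if_pos (by simp [h]), ih]; simp [h]; ring

-- run count of the seeded sequence = 1 + transition count
theorem pv_runs_ct (xs : List Int) (v : Int) : pvRuns (v :: xs) = 1 + pvCt v xs := by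
  induction xs generalizing v with
  | nil => simp [pvRuns, pvCt]
  | cons x rest ih =>
    by_cases h : x = v
    · have : pvRuns (v :: x :: rest) = pvRuns (v :: rest) := by
        simp [pvRuns, h]
      rw [this, ih]
      simp [pvCt, h]
    · have : pvRuns (v :: x :: rest) = 1 + pvRuns (x :: rest) := by
        simp [pvRuns, h]
      rw [this, ih]
      simp [pvCt, h]

theorem caracteristica11_spec : Claim_equal_caracteristica11 := by
  intro img tamImg _ _
  unfold Spec_caracteristica11 caracteristica11 caracteristica11_alt
  dsimp only
  have hb := PySem.List.foldl_pyRange_zero_pyGetD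
        (f := fun (st : Int × Int) fila =>
          if PySem.List.pyGetD fila (PySem.Int.truncdiv (PySem.Int.truncdiv tamImg ((img.length : Int))) 4 * 3) 0 ≠ st.2 then
            (st.1 + 1, PySem.List.pyGetD fila (PySem.Int.truncdiv (PySem.Int.truncdiv tamImg ((img.length : Int))) 4 * 3) 0)
          else st)
        (xs := img) (d := ([] : List Int)) (init := ((0, 0) : Int × Int))
  simp only [PySem.List.len] at hb
  rw [hb]
  rw [pv_foldl_ct (fun fila => PySem.List.pyGetD fila
        (PySem.Int.truncdiv (PySem.Int.truncdiv tamImg ((img.length : Int))) 4 * 3) 0) img 0 0]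
  rw [pv_runs_ct]
  ring
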